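-- pv_equiv track=rewrite | github.com/nvinzens/OATS | telemetry/TelemetrySubscription.py | __get_data_xpaths
-- ===== SOURCE A (Python) =====
-- def __get_data_xpaths(event_data):
--     root_xpath = None
--     name_xpath = None
--     data_xpath = None
--
--     for data in event_data:
--         for key in data:
--             if key == 'data_xpaths':
--                 for d in data[key]:
--                     for k in d:
--                         if k == 'root_xpath':
--                             root_xpath = d[k]
--                         if k == 'name_xpath':
--                             name_xpath = d[k]
--                         if k == 'data_xpath':
--                             data_xpath = d[k]
--     if root_xpath is None:
--         raise ValueError("Missing subscription config element <root_xpath> under <data_xpaths>")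
--     if name_xpath is None:
--         raise ValueError("Missing subscription config element <name_xpath> under <data_xpaths>")
--     if data_xpath is None:
--         raise ValueError("Missing subscription config element <data_xpath> under <data_xpaths>")
--     return root_xpath, name_xpath, data_xpath
-- ===== SOURCE B (Python) =====
-- def __get_data_xpaths(event_data):
--     # Two staged passes instead of one accumulator pass: first flatten every
--     # mapping found under 'data_xpaths' into one list, then resolve each of the
--     # three fields independently by searching that list BACK-TO-FRONT with an
--     # early return (first hit in reverse order == last binding, so last-wins
--     # semantics is preserved without tracking state through the traversal).
--     flat = []
--     for data in event_data:
--         if 'data_xpaths' in data: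
--             flat.extend(data['data_xpaths'])
--
--     def last_value(key):
--         for d in reversed(flat):
--             for k in reversed(list(d)):
--                 if k == key:
--                     return d[k]
--         raise ValueError(
--             "Missing subscription config element <%s> under <data_xpaths>" % key)
--
--     return (last_value('root_xpath'),
--             last_value('name_xpath'),
--             last_value('data_xpath'))
-- ===== Notes on version B (the rewrite author's own statement) =====
-- stated objective: alternative
-- what changed: Replaces A's single forward pass that threads three mutable accumulators through four nested loops by two stages: flatten all 'data_xpaths' mappings into one list, then resolve each field by an independent back-to-front search with early return (first hit in reverse = last binding).
import Mathlib
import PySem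

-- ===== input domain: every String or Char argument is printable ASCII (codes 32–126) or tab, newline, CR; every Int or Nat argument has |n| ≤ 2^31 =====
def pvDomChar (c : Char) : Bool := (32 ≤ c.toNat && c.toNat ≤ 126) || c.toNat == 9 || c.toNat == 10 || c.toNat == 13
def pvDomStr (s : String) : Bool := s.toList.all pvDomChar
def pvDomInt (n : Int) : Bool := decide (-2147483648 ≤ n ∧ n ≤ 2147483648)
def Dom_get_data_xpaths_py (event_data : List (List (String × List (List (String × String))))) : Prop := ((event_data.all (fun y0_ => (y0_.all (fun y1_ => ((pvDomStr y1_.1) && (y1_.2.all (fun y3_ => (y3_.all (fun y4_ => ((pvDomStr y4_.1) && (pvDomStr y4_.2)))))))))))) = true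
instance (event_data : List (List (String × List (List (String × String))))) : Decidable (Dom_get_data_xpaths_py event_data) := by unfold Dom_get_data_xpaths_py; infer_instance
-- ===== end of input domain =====

-- B replaces A's single forward pass threading three accumulators through four nested
-- loops by two stages: flatten the 'data_xpaths' mappings, then resolve each field by
-- an independent back-to-front search with early return (objective: alternative).

-- shared primitive: Python's first-match lookup d[k] on a mapping given as an association list
def pvLook (d : List (String × String)) (k : String) : Option String :=
  (d.find? (fun p => p.1 == k)).map (·.2)

-- ===== PORT A =====
-- A's innermost 'for k in d' body: three independent ifs assigning d[k]
def pvStepA (d : List (String × String))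
    (st : Option String × Option String × Option String) (k : String) :
    Option String × Option String × Option String :=
  (if k == "root_xpath" then pvLook d k else st.1,
   if k == "name_xpath" then pvLook d k else st.2.1,
   if k == "data_xpath" then pvLook d k else st.2.2)

-- 'for d in data[key]: for k in d: …'
def pvFoldD (st : Option String × Option String × Option String)
    (d : List (String × String)) : Option String × Option String × Option String :=
  d.foldl (fun st q => pvStepA d st q.1) st

def pvFoldDS (st : Option String × Option String × Option String)
    (ds : List (List (String × String))) : Option String × Option String × Option String :=
  ds.foldl pvFoldD st

-- 'for key in data: if key == "data_xpaths": …' (data[key] = first-match lookup)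
def pvFoldData (st : Option String × Option String × Option String)
    (data : List (String × List (List (String × String)))) :
    Option String × Option String × Option String :=
  data.foldl (fun st p =>
    if p.1 == "data_xpaths" then
      pvFoldDS st (((data.find? (fun q => q.1 == p.1)).map (·.2)).getD [])
    else st) st

def get_data_xpaths_py (event_data : List (List (String × List (List (String × String))))) : String × String × String :=
  let st := event_data.foldl pvFoldData (none, none, none)
  -- A raises ValueError when a component is still None; those inputs are outside Pre_
  (st.1.getD "", st.2.1.getD "", st.2.2.getD "")

-- ===== PORT B =====
-- stage 1: "if 'data_xpaths' in data: flat.extend(data['data_xpaths'])"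
def pvFlat (event_data : List (List (String × List (List (String × String))))) :
    List (List (String × String)) :=
  event_data.foldl (fun flat data =>
    if data.any (fun p => p.1 == "data_xpaths") then
      flat ++ (((data.find? (fun q => q.1 == "data_xpaths")).map (·.2)).getD [])
    else flat) []

-- inner loop of last_value: 'for k in reversed(list(d)): if k == key: return d[k]'
def pvFindIn (d : List (String × String)) (k : String) : Option String :=
  match d.reverse.find? (fun q => q.1 == k) with
  | some _ => pvLook d k
  | none => none

-- stage 2: 'for d in reversed(flat): …' with early return
def pvLastVal (flat : List (List (String × String))) (k : String) : Option String :=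
  flat.reverse.findSome? (fun d => pvFindIn d k)

def get_data_xpaths_py_alt (event_data : List (List (String × List (List (String × String))))) : String × String × String :=
  let flat := pvFlat event_data
  -- B raises ValueError when a search finds nothing; those inputs are outside Pre_
  ((pvLastVal flat "root_xpath").getD "", (pvLastVal flat "name_xpath").getD "",
   (pvLastVal flat "data_xpath").getD "")

-- ===== PRECONDITION & SPEC =====
-- Pre_ excludes exactly the inputs where A raises ValueError: some of the three xpath keys
-- never occurs in any mapping reachable under a 'data_xpaths' entry.
def pvHasX (event_data : List (List (String × List (List (String × String))))) (k : String) : Bool :=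
  event_data.any (fun data =>
    (((data.find? (fun p => p.1 == "data_xpaths")).map (·.2)).getD []).any
      (fun d => d.any (fun q => q.1 == k)))

def Pre_get_data_xpaths_py (event_data : List (List (String × List (List (String × String))))) : Prop :=
  (pvHasX event_data "root_xpath" && pvHasX event_data "name_xpath" && pvHasX event_data "data_xpath") = true

instance (event_data : List (List (String × List (List (String × String))))) : Decidable (Pre_get_data_xpaths_py event_data) := by
  unfold Pre_get_data_xpaths_py; infer_instance

def pvWitness_get_data_xpaths_py : (List (List (String × List (List (String × String))))) :=
  [[("data_xpaths", [[("root_xpath", "/r"), ("name_xpath", "/n"), ("data_xpath", "/d")]])]]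

def Spec_get_data_xpaths_py (event_data : List (List (String × List (List (String × String))))) (out : String × String × String) : Prop := out = get_data_xpaths_py_alt event_data
instance (event_data : List (List (String × List (List (String × String))))) (out : String × String × String) : Decidable (Spec_get_data_xpaths_py event_data out) := by unfold Spec_get_data_xpaths_py; infer_instance

-- ===== CLAIM (what is proved, stated in full; the proofs are below) =====
def Claim_equal_get_data_xpaths_py : Prop := ∀ (event_data : List (List (String × List (List (String × String))))), Dom_get_data_xpaths_py event_data → Pre_get_data_xpaths_py event_data → Spec_get_data_xpaths_py event_data (get_data_xpaths_py event_data)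

-- ===== LEMMAS AND PROOFS =====

-- last-wins accumulation of one key over a list of mappings (A's semantics, closed form)
def pvBig (ds : List (List (String × String))) (k : String) : Option String :=
  ds.foldl (fun a d => (pvLook d k).or a) none

theorem pvLook_eq_none_of_not_any (d : List (String × String)) (k : String)
    (h : d.any (fun q => q.1 == k) = false) : pvLook d k = none := by
  simp only [pvLook, Option.map_eq_none_iff]
  rw [List.find?_eq_none]
  exact List.any_eq_false.mp h

theorem pvLook_isSome_of_any (d : List (String × String)) (k : String)
    (h : d.any (fun q => q.1 == k) = true) : (pvLook d k).isSome = true := by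
  simpa [pvLook] using (List.isSome_find? ▸ h : (d.find? (fun q => q.1 == k)).isSome = true)

-- B's inner reversed key-scan returns exactly the first-match lookup
theorem pvFindIn_eq (d : List (String × String)) (k : String) : pvFindIn d k = pvLook d k := by
  unfold pvFindIn
  cases h : d.reverse.find? (fun q => q.1 == k) with
  | none =>
    have hall : ∀ q ∈ d, ¬ ((fun q => q.1 == k) q = true) := by
      intro q hq
      exact List.find?_eq_none.mp h q (List.mem_reverse.mpr hq)
    rw [pvLook_eq_none_of_not_any d k (List.any_eq_false.mpr hall)]
  | some p => rfl

theorem pvBig_cons (d : List (String × String)) (ds : List (List (String × String))) (k : String) :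
    pvBig (d :: ds) k = (pvBig ds k).or (pvLook d k) := by
  unfold pvBig
  simp only [List.foldl_cons]
  have : ∀ (L : List (List (String × String))) (a : Option String),
      L.foldl (fun a d => (pvLook d k).or a) a =
        (L.foldl (fun a d => (pvLook d k).or a) none).or a := by
    intro L
    induction L with
    | nil => simp
    | cons e L ihL =>
      intro a
      simp only [List.foldl_cons]
      rw [ihL ((pvLook e k).or a), ihL ((pvLook e k).or none), Option.or_assoc]
      simp
  rw [this ds ((pvLook d k).or none)]
  simp

theorem pvBig_append (xs ys : List (List (String × String))) (k : String) :
    pvBig (xs ++ ys) k = (pvBig ys k).or (pvBig xs k) := by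
  induction xs with
  | nil => simp [pvBig]
  | cons d xs ih =>
    rw [List.cons_append, pvBig_cons, pvBig_cons, ih, Option.or_assoc]

-- B's reversed early-return search equals A's last-wins accumulation
theorem pvLastVal_eq_pvBig (flat : List (List (String × String))) (k : String) :
    pvLastVal flat k = pvBig flat k := by
  induction flat with
  | nil => rfl
  | cons d flat ih =>
    unfold pvLastVal at *
    rw [List.reverse_cons, List.findSome?_append, ih, pvBig_cons]
    have hd : List.findSome? (fun d => pvFindIn d k) [d] = pvLook d k := by
      rw [← pvFindIn_eq]
      cases h : pvFindIn d k <;> simp [List.findSome?, h]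
    rw [hd]

-- ----- closed form of A's fold -----

-- one component of A's if-chain, pushed through the closed form
theorem pvIfComp (d0 : List (String × String)) (K q1 : String) (x : Option String) (anyd : Bool) :
    (if anyd then pvLook d0 K else (if q1 == K then pvLook d0 q1 else x)) =
      (if (q1 == K || anyd) then pvLook d0 K else x) := by
  by_cases hq : q1 == K
  · rw [beq_iff_eq.mp hq]
    by_cases hd : anyd <;> simp_all
  · simp [hq]

theorem pvFoldD_general (d0 : List (String × String)) (d : List (String × String))
    (st : Option String × Option String × Option String) :
    d.foldl (fun st q => pvStepA d0 st q.1) st =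
      ((if d.any (fun q => q.1 == "root_xpath") then pvLook d0 "root_xpath" else st.1),
       (if d.any (fun q => q.1 == "name_xpath") then pvLook d0 "name_xpath" else st.2.1),
       (if d.any (fun q => q.1 == "data_xpath") then pvLook d0 "data_xpath" else st.2.2)) := by
  induction d generalizing st with
  | nil => simp
  | cons q d ih =>
    simp only [List.foldl_cons, ih, List.any_cons]
    refine Prod.ext ?_ (Prod.ext ?_ ?_) <;> simp only [pvStepA] <;> rw [pvIfComp] <;> rfl

theorem pvFoldD_eq (d : List (String × String))
    (st : Option String × Option String × Option String) :
    pvFoldD st d =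
      ((pvLook d "root_xpath").or st.1, (pvLook d "name_xpath").or st.2.1,
       (pvLook d "data_xpath").or st.2.2) := by
  unfold pvFoldD
  rw [pvFoldD_general d d st]
  refine Prod.ext ?_ (Prod.ext ?_ ?_) <;> simp only []
  all_goals {
    split
    · rename_i h
      cases hl : pvLook d _ with
      | none =>
        exfalso
        have := pvLook_isSome_of_any d _ h
        rw [hl] at this; simp at this
      | some v => simp
    · rename_i h
      rw [pvLook_eq_none_of_not_any d _ (Bool.eq_false_iff.mpr h)]
      simp }

theorem pvFoldDS_eq (ds : List (List (String × String)))
    (st : Option String × Option String × Option String) :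
    pvFoldDS st ds =
      ((pvBig ds "root_xpath").or st.1, (pvBig ds "name_xpath").or st.2.1,
       (pvBig ds "data_xpath").or st.2.2) := by
  induction ds generalizing st with
  | nil => simp [pvFoldDS, pvBig]
  | cons d ds ih =>
    show pvFoldDS (pvFoldD st d) ds = _
    rw [ih, pvFoldD_eq]
    simp only [pvBig_cons, Option.or_assoc]

-- A's per-data fold: fires once per 'data_xpaths' key, idempotently
theorem pvFoldData_general (data0 data : List (String × List (List (String × String))))
    (st : Option String × Option String × Option String)
    (L0 : List (List (String × String)))
    (hL0 : L0 = ((data0.find? (fun q => q.1 == "data_xpaths")).map (·.2)).getD []) :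
    data.foldl (fun st p =>
        if p.1 == "data_xpaths" then
          pvFoldDS st (((data0.find? (fun q => q.1 == p.1)).map (·.2)).getD [])
        else st) st =
      if data.any (fun p => p.1 == "data_xpaths") then
        ((pvBig L0 "root_xpath").or st.1, (pvBig L0 "name_xpath").or st.2.1,
         (pvBig L0 "data_xpath").or st.2.2)
      else st := by
  induction data generalizing st with
  | nil => simp
  | cons p data ih =>
    simp only [List.foldl_cons, List.any_cons]
    by_cases hp : p.1 == "data_xpaths"
    · have hpe : p.1 = "data_xpaths" := beq_iff_eq.mp hp
      have hlk : ((data0.find? (fun q => q.1 == p.1)).map (·.2)).getD [] = L0 := by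
        rw [hpe, hL0]
      rw [if_pos hp, hlk, pvFoldDS_eq, ih]
      by_cases hany : (data.any fun p => p.1 == "data_xpaths") = true
      · simp only [hany, hp, Bool.true_or, if_true]
        refine Prod.ext ?_ (Prod.ext ?_ ?_) <;>
          simp [← Option.or_assoc, Option.or_self]
      · have hany' : (data.any fun p => p.1 == "data_xpaths") = false :=
          Bool.eq_false_iff.mpr hany
        simp [hany', hp]
    · rw [if_neg hp, ih]
      have hp' : (p.1 == "data_xpaths") = false := Bool.eq_false_iff.mpr hp
      simp only [hp', Bool.false_or]

theorem pvFoldData_eq (data : List (String × List (List (String × String))))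
    (st : Option String × Option String × Option String) :
    pvFoldData st data =
      (let L0 := ((data.find? (fun q => q.1 == "data_xpaths")).map (·.2)).getD []
       if data.any (fun p => p.1 == "data_xpaths") then
        ((pvBig L0 "root_xpath").or st.1, (pvBig L0 "name_xpath").or st.2.1,
         (pvBig L0 "data_xpath").or st.2.2)
      else st) := by
  exact pvFoldData_general data data st _ rfl

-- the flatten loop with any accumulator
theorem pvFlat_acc (ed : List (List (String × List (List (String × String)))))
    (acc : List (List (String × String))) :
    ed.foldl (fun flat data =>
      if data.any (fun p => p.1 == "data_xpaths") then
        flat ++ (((data.find? (fun q => q.1 == "data_xpaths")).map (·.2)).getD [])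
      else flat) acc = acc ++ pvFlat ed := by
  induction ed generalizing acc with
  | nil => simp [pvFlat]
  | cons data ed ih =>
    conv_rhs => rw [pvFlat]
    simp only [List.foldl_cons]
    rw [ih, ih]
    by_cases h : data.any (fun p => p.1 == "data_xpaths") <;> simp [h, List.append_assoc]

-- main invariant: A's running triple equals pvBig over the flattened list
theorem pvMain (ed : List (List (String × List (List (String × String)))))
    (st : Option String × Option String × Option String) :
    ed.foldl pvFoldData st =
      ((pvBig (pvFlat ed) "root_xpath").or st.1,
       (pvBig (pvFlat ed) "name_xpath").or st.2.1,
       (pvBig (pvFlat ed) "data_xpath").or st.2.2) := by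
  induction ed generalizing st with
  | nil => simp [pvFlat, pvBig]
  | cons data ed ih =>
    simp only [List.foldl_cons]
    rw [ih, pvFoldData_eq]
    have hflat : pvFlat (data :: ed) =
        (if data.any (fun p => p.1 == "data_xpaths") then
          (((data.find? (fun q => q.1 == "data_xpaths")).map (·.2)).getD []) else []) ++ pvFlat ed := by
      rw [pvFlat, List.foldl_cons, pvFlat_acc]
      by_cases h : data.any (fun p => p.1 == "data_xpaths") <;> simp [h]
    rw [hflat, pvBig_append, pvBig_append, pvBig_append]
    by_cases h : data.any (fun p => p.1 == "data_xpaths") <;>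
      simp [h, pvBig, Option.or_assoc]

-- ===== VERDICT (by name: the statement is the Claim_ definition above) =====
theorem get_data_xpaths_py_spec : Claim_equal_get_data_xpaths_py := by
  intro ed _hdom _hpre
  unfold Spec_get_data_xpaths_py get_data_xpaths_py get_data_xpaths_py_alt
  rw [pvMain ed (none, none, none)]
  simp [pvLastVal_eq_pvBig]
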